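-- pv_equiv track=rewrite | github.com/deepanshu-iitm/meddocs-assistant | backend/services/document_processor.py | extract_medical_sections
-- ===== SOURCE A (Python) =====
-- from typing import List, Dict, Any, Optional, Tuple
--
-- def extract_medical_sections(content: str) -> Dict[str, str]:
--     """
--     Extract common medical document sections
--
--     Args:
--         content: Full document text
--
--     Returns:
--         Dictionary mapping section names to content
--     """
--     sections = {}
--
--     # Common medical document section patterns
--     section_patterns = {
--         'introduction': [r'introduction', r'background', r'overview'],
--         'clinical_findings': [r'clinical findings', r'findings', r'results', r'observations'],
--         'patient_data': [r'patient data', r'patient information', r'demographics'],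
--         'diagnosis': [r'diagnosis', r'diagnostic', r'assessment'],
--         'treatment': [r'treatment', r'therapy', r'intervention', r'medication'],
--         'summary': [r'summary', r'conclusion', r'conclusions'],
--         'recommendations': [r'recommendations', r'recommendations', r'next steps']
--     }
--
--     # Simple section extraction based on headers
--     lines = content.split('\n')
--     current_section = 'general'
--     sections[current_section] = []
--
--     for line in lines:
--         line_lower = line.lower().strip()
--
--         # Check if line is a section header
--         section_found = False
--         for section_name, patterns in section_patterns.items():
--             for pattern in patterns:
--                 if pattern in line_lower and len(line.strip()) < 100:  # Likely a header
--                     current_section = section_name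
--                     if current_section not in sections:
--                         sections[current_section] = []
--                     section_found = True
--                     break
--             if section_found:
--                 break
--
--         if not section_found and line.strip():
--             sections[current_section].append(line)
--
--     # Convert lists to strings
--     for section_name in sections:
--         sections[section_name] = '\n'.join(sections[section_name]).strip()
--
--     # Remove empty sections
--     sections = {k: v for k, v in sections.items() if v.strip()}
--
--     return sections
-- ===== SOURCE B (Python) =====
-- # B: two-pass decomposition — classify each line against a flattened (pattern, section)
-- # list, record switch/content events, then aggregate events into the ordered dict.
--
-- _FLAT_PATTERNS = [
--     ('introduction', 'introduction'), ('introduction', 'background'), ('introduction', 'overview'),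
--     ('clinical_findings', 'clinical findings'), ('clinical_findings', 'findings'),
--     ('clinical_findings', 'results'), ('clinical_findings', 'observations'),
--     ('patient_data', 'patient data'), ('patient_data', 'patient information'), ('patient_data', 'demographics'),
--     ('diagnosis', 'diagnosis'), ('diagnosis', 'diagnostic'), ('diagnosis', 'assessment'),
--     ('treatment', 'treatment'), ('treatment', 'therapy'), ('treatment', 'intervention'), ('treatment', 'medication'),
--     ('summary', 'summary'), ('summary', 'conclusion'), ('summary', 'conclusions'),
--     ('recommendations', 'recommendations'), ('recommendations', 'recommendations'), ('recommendations', 'next steps'),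
-- ]
--
--
-- def _classify(line):
--     """Section name if line is a header (first flattened match), else None."""
--     if len(line.strip()) >= 100:
--         return None
--     line_lower = line.lower().strip()
--     return next((name for name, pat in _FLAT_PATTERNS if pat in line_lower), None)
--
--
-- def extract_medical_sections(content):
--     # pass 1: per-line events — ('switch', section) or ('text', section, line)
--     events = []
--     cur = 'general'
--     for line in content.split('\n'):
--         hit = _classify(line)
--         if hit is not None:
--             cur = hit
--             events.append(('switch', hit))
--         elif line.strip():
--             events.append(('text', cur, line))
--
--     # pass 2: aggregate into an ordered dict of line lists, 'general' seeded first
--     buckets = {'general': []}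
--     for ev in events:
--         if ev[0] == 'switch':
--             buckets.setdefault(ev[1], [])
--         else:
--             buckets[ev[1]].append(ev[2])
--
--     # finish: join, strip, drop empties
--     result = {}
--     for name, lines in buckets.items():
--         text = '\n'.join(lines).strip()
--         if text:
--             result[name] = text
--     return result
-- ===== Notes on version B (the rewrite author's own statement) =====
-- stated objective: alternative
-- what changed: Replaces A's single interleaved loop (nested dict-of-pattern-lists scan with break flags, building the section dict while scanning) with a two-pass decomposition: a classifier over a flattened (section, pattern) list first turns each line into a switch/content event, then a separate aggregation pass folds the event list into the ordered buckets dict.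
import Mathlib
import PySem

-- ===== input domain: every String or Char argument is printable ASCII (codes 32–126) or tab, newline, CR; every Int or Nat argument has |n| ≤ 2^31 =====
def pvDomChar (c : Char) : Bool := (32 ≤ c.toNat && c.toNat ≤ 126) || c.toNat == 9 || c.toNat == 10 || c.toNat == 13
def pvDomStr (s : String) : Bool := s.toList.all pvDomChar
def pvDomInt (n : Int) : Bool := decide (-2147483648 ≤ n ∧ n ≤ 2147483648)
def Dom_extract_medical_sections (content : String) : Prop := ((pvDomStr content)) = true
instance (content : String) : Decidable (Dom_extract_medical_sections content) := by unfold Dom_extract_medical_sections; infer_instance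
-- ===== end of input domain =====

-- B replaces A's interleaved dict-building loop with a classify/events/aggregate
-- two-pass decomposition over a flattened pattern list (objective: alternative).

-- ===== PORT A =====
def pvSectionPatterns : List (String × List String) :=
  [("introduction", ["introduction", "background", "overview"]),
   ("clinical_findings", ["clinical findings", "findings", "results", "observations"]),
   ("patient_data", ["patient data", "patient information", "demographics"]),
   ("diagnosis", ["diagnosis", "diagnostic", "assessment"]),
   ("treatment", ["treatment", "therapy", "intervention", "medication"]),
   ("summary", ["summary", "conclusion", "conclusions"]),
   ("recommendations", ["recommendations", "recommendations", "next steps"])]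

-- A's nested header loop with break: first (section, pattern) pair that matches
def pvFindHeaderA : List (String × List String) → String → Int → Option String
  | [], _, _ => none
  | (name, ps) :: rest, ll, n =>
    if ps.any (fun p => PySem.Str.isIn p ll && decide (n < 100)) then some name
    else pvFindHeaderA rest ll n

def pvStepA (st : PySem.Dict String (List String) × String) (line : String) :
    PySem.Dict String (List String) × String :=
  -- line_lower = line.lower().strip() inlined at its single use
  match pvFindHeaderA pvSectionPatterns (PySem.Str.strip (PySem.Str.lower line))
      (PySem.Str.len (PySem.Str.strip line)) with
  | some name => (if st.1.contains name then st.1 else st.1.insert name [], name)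
  | none =>
    if PySem.Str.strip line ≠ "" then (st.1.modify st.2 [] (· ++ [line]), st.2) else st

def extract_medical_sections (content : String) : List (String × String) :=
  let lines := (PySem.Str.split? content "\n").getD []
  let st := lines.foldl pvStepA (PySem.Dict.empty.insert "general" [], "general")
  let joined := st.1.items.map (fun p => (p.1, PySem.Str.strip (PySem.Str.join "\n" p.2)))
  joined.filter (fun p => PySem.Str.strip p.2 != "")

-- ===== PORT B =====
def pvFlatPatterns : List (String × String) :=
  [("introduction", "introduction"), ("introduction", "background"), ("introduction", "overview"),
   ("clinical_findings", "clinical findings"), ("clinical_findings", "findings"),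
   ("clinical_findings", "results"), ("clinical_findings", "observations"),
   ("patient_data", "patient data"), ("patient_data", "patient information"),
   ("patient_data", "demographics"),
   ("diagnosis", "diagnosis"), ("diagnosis", "diagnostic"), ("diagnosis", "assessment"),
   ("treatment", "treatment"), ("treatment", "therapy"), ("treatment", "intervention"),
   ("treatment", "medication"),
   ("summary", "summary"), ("summary", "conclusion"), ("summary", "conclusions"),
   ("recommendations", "recommendations"), ("recommendations", "recommendations"),
   ("recommendations", "next steps")]

def pvClassifyB (line : String) : Option String :=
  if 100 ≤ PySem.Str.len (PySem.Str.strip line) then none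
  else
    let ll := PySem.Str.strip (PySem.Str.lower line)
    (pvFlatPatterns.find? (fun q => PySem.Str.isIn q.2 ll)).map (·.1)

-- pass 1: per-line events — Sum.inl section (switch) or Sum.inr (section, line) (content)
def pvPass1Step (st : List (String ⊕ String × String) × String) (line : String) :
    List (String ⊕ String × String) × String :=
  match pvClassifyB line with
  | some h => (st.1 ++ [Sum.inl h], h)
  | none => if PySem.Str.strip line ≠ "" then (st.1 ++ [Sum.inr (st.2, line)], st.2) else st

-- pass 2: aggregate one event into the ordered buckets dict
def pvAggStep (d : PySem.Dict String (List String)) :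
    (String ⊕ String × String) → PySem.Dict String (List String)
  | Sum.inl name => d.setdefault name []
  | Sum.inr (sec, line) => d.modify sec [] (· ++ [line])

def extract_medical_sections_alt (content : String) : List (String × String) :=
  let lines := (PySem.Str.split? content "\n").getD []
  let events := (lines.foldl pvPass1Step ([], "general")).1
  let buckets := events.foldl pvAggStep (PySem.Dict.empty.insert "general" [])
  buckets.items.foldl (fun res p =>
    let text := PySem.Str.strip (PySem.Str.join "\n" p.2)
    if text ≠ "" then res ++ [(p.1, text)] else res) []

-- ===== PRECONDITION & SPEC =====
def Spec_extract_medical_sections (content : String) (out : List (String × String)) : Prop := out = extract_medical_sections_alt content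
instance (content : String) (out : List (String × String)) : Decidable (Spec_extract_medical_sections content out) := by unfold Spec_extract_medical_sections; infer_instance

-- ===== CLAIM (what is proved, stated in full; the proofs are below) =====
def Claim_equal_extract_medical_sections : Prop := ∀ (content : String), Dom_extract_medical_sections content → Spec_extract_medical_sections content (extract_medical_sections content)

-- ===== LEMMAS AND PROOFS =====

-- cons-style view of B's first pass (proof-only helper)
def pvPass1Rec : List String → String → List (String ⊕ String × String)
  | [], _ => []
  | l :: ls, cur =>
    match pvClassifyB l with
    | some h => Sum.inl h :: pvPass1Rec ls h
    | none =>
      if PySem.Str.strip l ≠ "" then Sum.inr (cur, l) :: pvPass1Rec ls cur else pvPass1Rec ls cur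

theorem pvPass1_acc (lines : List String) :
    ∀ (acc : List (String ⊕ String × String)) (cur : String),
      (lines.foldl pvPass1Step (acc, cur)).1 = acc ++ pvPass1Rec lines cur := by
  induction lines with
  | nil => intro acc cur; simp [pvPass1Rec]
  | cons l ls ih =>
    intro acc cur
    simp only [List.foldl_cons, pvPass1Step, pvPass1Rec]
    cases h : pvClassifyB l with
    | some s => simp [ih]
    | none =>
      by_cases hs : PySem.Str.strip l ≠ "" <;> simp [hs, ih]

theorem pvFindHeaderA_big (nps : List (String × List String)) (ll : String) (n : Int)
    (h : 100 ≤ n) : pvFindHeaderA nps ll n = none := by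
  induction nps with
  | nil => rfl
  | cons q rest ih =>
    obtain ⟨name, ps⟩ := q
    simp [pvFindHeaderA, ih, show ¬ n < 100 by omega]

theorem pvFindHeaderA_flat (nps : List (String × List String)) (ll : String) (n : Int)
    (h : n < 100) :
    pvFindHeaderA nps ll n =
      ((nps.flatMap (fun q => q.2.map (fun p => (q.1, p)))).find?
        (fun q => PySem.Str.isIn q.2 ll)).map (·.1) := by
  induction nps with
  | nil => rfl
  | cons q rest ih =>
    obtain ⟨name, ps⟩ := q
    simp only [pvFindHeaderA, List.flatMap_cons, List.find?_append]
    by_cases hany : ps.any (fun p => PySem.Str.isIn p ll) = true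
    · obtain ⟨p0, hp0, hm⟩ := List.any_eq_true.mp hany
      simp only [decide_eq_true (show n < 100 from h), Bool.and_true, hany, if_true]
      have : (List.map (fun p => (name, p)) ps).find? (fun q => PySem.Str.isIn q.2 ll)
          = ((ps.find? (fun p => PySem.Str.isIn p ll)).map (fun p => (name, p))) := by
        simp [List.find?_map, Function.comp_def]
      rw [this]
      cases hf : ps.find? (fun p => PySem.Str.isIn p ll) with
      | none => exact absurd hm (List.find?_eq_none.mp hf p0 hp0)
      | some p1 => simp
    · have hnone : (List.map (fun p => (name, p)) ps).find? (fun q => PySem.Str.isIn q.2 ll)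
          = none := by
        apply List.find?_eq_none.mpr
        intro x hx
        obtain ⟨p, hp, rfl⟩ := List.mem_map.mp hx
        simpa using fun hc => hany (List.any_eq_true.mpr ⟨p, hp, hc⟩)
      simp only [decide_eq_true (show n < 100 from h), Bool.and_true, hany, hnone,
        Option.none_or]
      exact ih

theorem pvFlat_eq :
    pvSectionPatterns.flatMap (fun q => q.2.map (fun p => (q.1, p))) = pvFlatPatterns := by
  rfl

theorem pvFindHeader_eq_classify (line : String) :
    pvFindHeaderA pvSectionPatterns (PySem.Str.strip (PySem.Str.lower line))
      (PySem.Str.len (PySem.Str.strip line)) = pvClassifyB line := by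
  unfold pvClassifyB
  by_cases h : 100 ≤ PySem.Str.len (PySem.Str.strip line)
  · rw [pvFindHeaderA_big _ _ _ h, if_pos h]
  · simp only [h, if_false]
    rw [pvFindHeaderA_flat _ _ _ (by omega), pvFlat_eq]

theorem pvFold_eq (lines : List String) :
    ∀ (d : PySem.Dict String (List String)) (cur : String),
      (lines.foldl pvStepA (d, cur)).1 = (pvPass1Rec lines cur).foldl pvAggStep d := by
  induction lines with
  | nil => intro d cur; rfl
  | cons l ls ih =>
    intro d cur
    cases h : pvClassifyB l with
    | some name =>
      have hA : pvStepA (d, cur) l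
          = (if d.contains name then d else d.insert name [], name) := by
        unfold pvStepA; rw [pvFindHeader_eq_classify l, h]
      rw [List.foldl_cons, hA]
      unfold pvPass1Rec
      rw [h, List.foldl_cons, ih]
      have hAgg : pvAggStep d (Sum.inl name)
          = (if d.contains name then d else d.insert name []) := by
        unfold pvAggStep
        by_cases hc : d.contains name = true
        · rw [if_pos hc]; exact PySem.Dict.setdefault_of_contains d _ hc
        · rw [if_neg hc]; exact PySem.Dict.setdefault_of_not_contains d _ (by simpa using hc)
      rw [hAgg]
    | none =>
      have hA : pvStepA (d, cur) l
          = if PySem.Str.strip l ≠ "" then (d.modify cur [] (· ++ [l]), cur) else (d, cur) := by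
        unfold pvStepA; rw [pvFindHeader_eq_classify l, h]
      rw [List.foldl_cons, hA]
      unfold pvPass1Rec
      rw [h]
      by_cases hs : PySem.Str.strip l ≠ ""
      · rw [if_pos hs, if_pos hs, List.foldl_cons, ih]; rfl
      · rw [if_neg hs, if_neg hs, ih]

theorem pvDropWhile_prefix {p : Char → Bool} {r l : List Char}
    (hpre : r <+: l) (h : l.dropWhile p = l) : r.dropWhile p = r := by
  cases r with
  | nil => rfl
  | cons a t =>
    obtain ⟨rest, rfl⟩ := hpre
    have hpa : p a = false := by
      by_contra hne
      have hpa : p a = true := by simpa using hne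
      rw [List.cons_append, List.dropWhile_cons, if_pos hpa] at h
      have := List.length_dropWhile_le p (t ++ rest)
      rw [h] at this
      simp at this
    rw [List.dropWhile_cons, if_neg (by simp [hpa])]

theorem pvStrip_idem_chars (s : List Char) :
    PySem.Chars.strip (PySem.Chars.strip s) = PySem.Chars.strip s := by
  simp only [PySem.Chars.strip, PySem.Chars.lstrip, PySem.Chars.rstrip]
  set p := PySem.Chars.isspace
  set t := List.dropWhile p s with ht
  have ht2 : List.dropWhile p t = t := List.dropWhile_idempotent p s
  set r := (List.dropWhile p t.reverse).reverse with hr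
  have hlr : List.dropWhile p r = r := by
    apply pvDropWhile_prefix (l := t) _ ht2
    have : List.dropWhile p t.reverse <:+ t.reverse := List.dropWhile_suffix p
    simpa using this.reverse
  rw [hlr, hr]
  rw [List.reverse_reverse, List.dropWhile_idempotent]

theorem pvStrip_idem (s : String) :
    PySem.Str.strip (PySem.Str.strip s) = PySem.Str.strip s := by
  have h : (PySem.Str.strip (PySem.Str.strip s)).toList = (PySem.Str.strip s).toList := by
    simp [pvStrip_idem_chars]
  exact String.toList_injective h

theorem pvFinish_eq (l : List (String × List String)) :
    l.foldl (fun res p =>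
      let text := PySem.Str.strip (PySem.Str.join "\n" p.2)
      if text ≠ "" then res ++ [(p.1, text)] else res) []
    = (l.map (fun p => (p.1, PySem.Str.strip (PySem.Str.join "\n" p.2)))).filter
        (fun p => PySem.Str.strip p.2 != "") := by
  rw [PySem.List.foldl_append_ite
    (p := fun p : String × List String => PySem.Str.strip (PySem.Str.join "\n" p.2) ≠ "")
    (f := fun p : String × List String => (p.1, PySem.Str.strip (PySem.Str.join "\n" p.2)))]
  rw [List.nil_append, List.filter_map]
  refine congrArg (List.map _) (List.filter_congr ?_)
  intro x _
  simp only [Function.comp_apply, pvStrip_idem, bne, decide_not]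
  congr 1

-- ===== VERDICT (by name: the statement is the Claim_ definition above) =====
theorem extract_medical_sections_spec : Claim_equal_extract_medical_sections := by
  intro content _
  unfold Spec_extract_medical_sections extract_medical_sections extract_medical_sections_alt
  simp only []
  rw [pvPass1_acc, List.nil_append, pvFold_eq, pvFinish_eq]
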